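-- pv_equiv track=rewrite | github.com/karanmotghare/SNSAssignment1 | que8.py | is_sol
-- ===== SOURCE A (Python) =====
-- def gcd(a, b):
--
--     if b == 0:
--         return a
--
--     return gcd(b, a % b)
--
-- def is_sol(sol):
--
--     for i in range(len(sol)):
--
--         eq = sol[i]
--
--         a = eq[0]
--         b = eq[1]
--         m = eq[2]
--
--         g = gcd(a, m)
--
--         if g != 1 or b % g != 0:
--             return False
--
--     return True
-- ===== SOURCE B (Python) =====
-- def gcd(a, b):
--     while b != 0:
--         a, b = b, a % b
--     return a
--
-- def is_sol(sol):
--     # A system is solvable under this check iff every (a, b, m) has gcd(a, m) == 1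
--     # (when the gcd is 1, b % g == 0 holds automatically, so that test is redundant).
--     return all(gcd(a, m) == 1 for a, b, m in sol)
-- ===== Notes on version B (the rewrite author's own statement) =====
-- stated objective: idiomatic
-- what changed: B replaces the recursive gcd with an iterative Euclidean while-loop and replaces the index-driven early-return loop by a single all(...) over unpacked triples, dropping the redundant 'b % g != 0' test (it can only run when g == 1, where b % 1 == 0 always).
import Mathlib
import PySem

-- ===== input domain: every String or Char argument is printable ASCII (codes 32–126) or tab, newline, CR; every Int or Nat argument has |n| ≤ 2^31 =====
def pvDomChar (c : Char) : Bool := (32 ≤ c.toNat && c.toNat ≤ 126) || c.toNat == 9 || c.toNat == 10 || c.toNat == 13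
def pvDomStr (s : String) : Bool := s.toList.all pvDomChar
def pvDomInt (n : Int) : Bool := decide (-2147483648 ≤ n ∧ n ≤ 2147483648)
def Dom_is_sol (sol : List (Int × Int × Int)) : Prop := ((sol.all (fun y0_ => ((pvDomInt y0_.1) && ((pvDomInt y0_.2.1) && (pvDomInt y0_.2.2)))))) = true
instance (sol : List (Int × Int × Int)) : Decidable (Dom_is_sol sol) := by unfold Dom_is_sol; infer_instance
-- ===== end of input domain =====

-- B replaces the recursive gcd by an iterative Euclidean loop and the index-driven
-- early-return loop by a single all(...) over unpacked triples (objective: idiomatic).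

-- termination measure for Python's Euclidean recurrence (used by both ports)
theorem pyMod_natAbs_lt (a b : Int) (hb : b ≠ 0) :
    (PySem.Int.mod a b).natAbs < b.natAbs := by
  rcases lt_or_gt_of_ne hb with h | h
  · have := PySem.Int.mod_neg_bounds a h
    omega
  · have h1 := PySem.Int.mod_nonneg a h
    have h2 := PySem.Int.mod_lt a h
    omega

-- ===== PORT A =====
-- recursive gcd, as in A
def gcdA (a b : Int) : Int :=
  if h : b = 0 then a
  else gcdA b (PySem.Int.mod a b)
termination_by b.natAbs
decreasing_by exact pyMod_natAbs_lt a b h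

-- the 'for i in range(len(sol))' loop with early 'return False'
def isSolLoop (sol : List (Int × Int × Int)) (i : Nat) : Bool :=
  if h : i < sol.length then
    let eq := sol[i]
    let a := eq.1
    let b := eq.2.1
    let m := eq.2.2
    let g := gcdA a m
    if g ≠ 1 || PySem.Int.mod b g ≠ 0 then false
    else isSolLoop sol (i + 1)
  else true
termination_by sol.length - i

def is_sol (sol : List (Int × Int × Int)) : Bool := isSolLoop sol 0

-- ===== PORT B =====
-- iterative Euclidean loop: while b != 0: a, b = b, a % b
def gcdB (a b : Int) : Int :=
  if h : b ≠ 0 then gcdB b (PySem.Int.mod a b)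
  else a
termination_by b.natAbs
decreasing_by exact pyMod_natAbs_lt a b h

def is_sol_alt (sol : List (Int × Int × Int)) : Bool :=
  sol.all (fun t => gcdB t.1 t.2.2 == 1)

-- ===== PRECONDITION & SPEC =====
def Spec_is_sol (sol : List (Int × Int × Int)) (out : Bool) : Prop := out = is_sol_alt sol
instance (sol : List (Int × Int × Int)) (out : Bool) : Decidable (Spec_is_sol sol out) := by unfold Spec_is_sol; infer_instance

-- ===== CLAIM (what is proved, stated in full; the proofs are below) =====
def Claim_equal_is_sol : Prop := ∀ (sol : List (Int × Int × Int)), Dom_is_sol sol → Spec_is_sol sol (is_sol sol)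

-- ===== LEMMAS AND PROOFS =====

theorem gcdA_eq_gcdB (a b : Int) : gcdA a b = gcdB a b := by
  fun_induction gcdA a b with
  | case1 => rw [gcdB]; simp_all
  | case2 => rw [gcdB]; simp_all

theorem isSolLoop_eq_all_drop (sol : List (Int × Int × Int)) (i : Nat) :
    isSolLoop sol i = (sol.drop i).all (fun t => gcdB t.1 t.2.2 == 1) := by
  by_cases h : i < sol.length
  · have hd : sol.drop i = sol[i] :: sol.drop (i + 1) := List.drop_eq_getElem_cons h
    rw [isSolLoop]
    simp only [h, dif_pos, hd, List.all_cons, gcdA_eq_gcdB]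
    set g := gcdB sol[i].1 sol[i].2.2 with hgdef
    by_cases hg : g = 1
    · simp [hg, isSolLoop_eq_all_drop sol (i + 1)]
    · simp [hg]
  · have hle : sol.length ≤ i := by omega
    rw [isSolLoop]
    simp [h, List.drop_eq_nil_of_le hle]
termination_by sol.length - i
decreasing_by omega

-- ===== VERDICT (by name: the statement is the Claim_ definition above) =====
theorem is_sol_spec : Claim_equal_is_sol := by
  intro sol _
  unfold Spec_is_sol is_sol is_sol_alt
  simpa using isSolLoop_eq_all_drop sol 0
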